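-- pv_equiv track=rewrite | github.com/kokx/aoc | 2018/15/part-one-faster.py | find_next
-- ===== SOURCE A (Python) =====
-- def find_next(paths):
--     # FIRST: find best destination square in reading order
--     dests = [path[len(path) - 1] for path in paths]
--     dests.sort()
--     dest = dests[0]
--     paths = [path for path in paths if path[len(path) - 1] == dest]
--     # THEN: from those, find best step in reading order
--     # for each path, get path[1], path[0] = current
--     dirs = [path[1] for path in paths]
--     dirs.sort()
--     return dirs[0]
-- ===== SOURCE B (Python) =====
-- def find_next(paths):
--     # linear scan for the best (reading-order least) destination, no sorting
--     dest = None
--     for p in paths: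
--         if dest is None or p[-1] < dest:
--             dest = p[-1]
--     # second linear scan: running minimum first step among paths reaching dest
--     step = None
--     for p in paths:
--         if p[-1] == dest and (step is None or p[1] < step):
--             step = p[1]
--     return step
-- ===== Notes on version B (the rewrite author's own statement) =====
-- stated objective: alternative
-- what changed: Replaces A's sort-then-index-then-filter-then-sort with two explicit linear scans that keep a running Optional minimum (first the least destination, then the least first step among paths reaching it), so no list is sorted, filtered or materialised.
import Mathlib
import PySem

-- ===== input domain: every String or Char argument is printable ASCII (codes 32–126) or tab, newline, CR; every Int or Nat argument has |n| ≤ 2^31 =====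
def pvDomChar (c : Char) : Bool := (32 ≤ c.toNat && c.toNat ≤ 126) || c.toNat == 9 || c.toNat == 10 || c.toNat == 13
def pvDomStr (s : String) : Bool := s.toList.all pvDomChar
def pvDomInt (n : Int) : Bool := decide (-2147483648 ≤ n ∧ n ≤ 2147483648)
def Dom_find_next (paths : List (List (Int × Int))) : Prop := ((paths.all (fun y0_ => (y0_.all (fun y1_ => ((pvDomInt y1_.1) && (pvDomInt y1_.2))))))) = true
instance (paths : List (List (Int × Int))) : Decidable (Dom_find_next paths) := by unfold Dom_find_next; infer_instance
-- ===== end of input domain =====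

-- B replaces A's sort-filter-sort with two explicit linear scans keeping a running Optional
-- minimum (least destination, then least step among paths reaching it); objective: alternative.
-- Where Python raises (a pyGetD default is hit) the input is excluded by Pre_.

-- ===== PORT A =====
-- port of A: dests = [path[len(path)-1] …]; dests.sort(); dest = dests[0]; filter; dirs = [path[1] …]; dirs.sort(); dirs[0]
-- (pyGetD defaults (0,0) stand where Python raises IndexError; Pre_ excludes those inputs)
def find_next (paths : List (List (Int × Int))) : Int × Int :=
  let dests := paths.map (fun path => PySem.List.pyGetD path ((path.length : Int) - 1) (0, 0))
  let dests := PySem.List.sorted2 dests Prod.fst Prod.snd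
  let dest := PySem.List.pyGetD dests 0 (0, 0)
  let paths2 := paths.filter (fun path => PySem.List.pyGetD path ((path.length : Int) - 1) (0, 0) == dest)
  let dirs := paths2.map (fun path => PySem.List.pyGetD path 1 (0, 0))
  let dirs := PySem.List.sorted2 dirs Prod.fst Prod.snd
  PySem.List.pyGetD dirs 0 (0, 0)

-- ===== PORT B =====
-- Python tuple '<' on pairs of ints (lexicographic)
def pvLexLt (a b : Int × Int) : Bool := decide (a.1 < b.1) || (decide (a.1 = b.1) && decide (a.2 < b.2))

-- port of B: two for-loops with running Optional minima, step = p[1] taken only of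
-- paths whose last square equals the final dest (None is Option; 'p[-1] == dest' with
-- dest = None is False in Python = 'some d == none' here)
-- (step = None at the end has no Int × Int value: .getD (0,0) stands there; outside Pre_)
def find_next_alt (paths : List (List (Int × Int))) : Int × Int :=
  let dest := paths.foldl (fun o p =>
    let d := PySem.List.pyGetD p (-1) (0, 0)
    if (match o with | none => true | some m => pvLexLt d m) then some d else o) none
  let step := paths.foldl (fun o p =>
    if (some (PySem.List.pyGetD p (-1) (0, 0)) == dest) &&
       (match o with | none => true | some m => pvLexLt (PySem.List.pyGetD p 1 (0, 0)) m)
    then some (PySem.List.pyGetD p 1 (0, 0)) else o) none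
  step.getD (0, 0)

-- ===== PRECONDITION & SPEC =====
-- Python lexicographic ≤ on pairs, Bool-valued (used only to state Pre_)
def pvLexLe (a b : Int × Int) : Bool := decide (a.1 < b.1) || (decide (a.1 = b.1) && decide (a.2 ≤ b.2))

-- Exactly where A returns: nonempty list of nonempty paths, and every path reaching the best
-- (lexicographically least) destination has a second element (A takes path[1] only of those).
def Pre_find_next (paths : List (List (Int × Int))) : Prop :=
  paths ≠ [] ∧ ∀ p ∈ paths, p ≠ [] ∧
    ((∀ q ∈ paths, pvLexLe (p.getLastD (0, 0)) (q.getLastD (0, 0)) = true) → 2 ≤ p.length)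
instance (paths : List (List (Int × Int))) : Decidable (Pre_find_next paths) := by
  unfold Pre_find_next; infer_instance

def pvWitness_find_next : (List (List (Int × Int))) := [[(5, 5)], [(1, 2), (1, 3), (0, 0)]]

def Spec_find_next (paths : List (List (Int × Int))) (out : Int × Int) : Prop := out = find_next_alt paths
instance (paths : List (List (Int × Int))) (out : Int × Int) : Decidable (Spec_find_next paths out) := by unfold Spec_find_next; infer_instance

-- ===== CLAIM (what is proved, stated in full; the proofs are below) =====
def Claim_equal_find_next : Prop := ∀ (paths : List (List (Int × Int))), Dom_find_next paths → Pre_find_next paths → Spec_find_next paths (find_next paths)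

-- ===== LEMMAS AND PROOFS =====

-- sorted2's insertion comparator is the lexicographic strict order
theorem sorted2_before_eq_pvLexLt (a b : Int × Int) :
    (decide (a.1 < b.1) || (!decide (b.1 < a.1) && decide (a.2 < b.2))) = pvLexLt a b := by
  unfold pvLexLt
  by_cases h1 : a.1 < b.1 <;> by_cases h2 : b.1 < a.1 <;> by_cases h3 : a.1 = b.1 <;>
    simp [h1, h2, h3] <;> try omega

-- indexing a list at len-1 and at -1 agree (both default when the list is empty)
theorem pyGetD_len_sub_one_eq_neg_one (p : List (Int × Int)) (d : Int × Int) :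
    PySem.List.pyGetD p ((p.length : Int) - 1) d = PySem.List.pyGetD p (-1) d := by
  cases p with
  | nil => rfl
  | cons x xs =>
    simp [PySem.List.pyGetD, PySem.List.pyGet?, PySem.List.pyIdx?]

-- head of insertBy
theorem head?_insertBy {α : Type} (before : α → α → Bool) (x : α) (acc : List α) :
    (PySem.List.insertBy before x acc).head? =
      some (match acc.head? with | none => x | some y => if before x y then x else y) := by
  cases acc with
  | nil => rfl
  | cons y ys =>
    by_cases h : before x y = true <;> simp [PySem.List.insertBy, h]

-- the head of a foldl of insertBy is the running minimum in the if-guard shape B's loop uses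
theorem head?_foldl_insertBy {α : Type} (before : α → α → Bool) (xs : List α) (acc : List α) :
    (xs.foldl (fun a x => PySem.List.insertBy before x a) acc).head? =
      xs.foldl (fun o x =>
        if (match o with | none => true | some m => before x m) then some x else o) acc.head? := by
  induction xs generalizing acc with
  | nil => rfl
  | cons x t ih =>
    simp only [List.foldl_cons]
    rw [ih, head?_insertBy]
    cases acc with
    | nil => rfl
    | cons y ys => by_cases h : before x y = true <;> simp [h]

-- a foldl whose body only acts on elements passing a guard is a foldl over the filtered list
theorem foldl_guard_eq_foldl_filter {α β : Type} (c : α → Bool) (f : β → α → Bool)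
    (g : β → α → β) (xs : List α) (init : β) :
    xs.foldl (fun o p => if c p && f o p then g o p else o) init =
      (xs.filter c).foldl (fun o p => if f o p then g o p else o) init := by
  induction xs generalizing init with
  | nil => rfl
  | cons p t ih =>
    by_cases h : c p = true
    · rw [List.filter_cons_of_pos h]
      simp only [List.foldl_cons, h, Bool.true_and]
      exact ih _
    · have h' : c p = false := by simpa using h
      rw [List.filter_cons_of_neg (by simp [h'])]
      simp only [List.foldl_cons, h', Bool.false_and, Bool.false_eq_true, if_false]
      exact ih _

-- head of Python sort by (fst, snd), with default, as B's running-minimum loop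
theorem pyGetD_sorted2_eq_fold (xs : List (Int × Int)) (d : Int × Int) :
    PySem.List.pyGetD (PySem.List.sorted2 xs Prod.fst Prod.snd) 0 d =
      (xs.foldl (fun o x =>
        if (match o with | none => true | some m => pvLexLt x m) then some x else o) none).getD d := by
  have hs : PySem.List.pyGetD (PySem.List.sorted2 xs Prod.fst Prod.snd) 0 d =
      (PySem.List.sorted2 xs Prod.fst Prod.snd).head?.getD d := by
    cases hxs : PySem.List.sorted2 xs Prod.fst Prod.snd
    all_goals simp [PySem.List.pyGetD, PySem.List.pyGet?, PySem.List.pyIdx?]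
  rw [hs]
  simp only [PySem.List.sorted2, Bool.false_eq_true, if_false]
  rw [head?_foldl_insertBy]
  simp only [sorted2_before_eq_pvLexLt]
  rw [List.head?_nil]
  congr
  funext o x
  cases o <;> rfl

theorem destfold_ne_none (l : List (List (Int × Int))) (v : Int × Int) :
    l.foldl (fun o p =>
      let d := PySem.List.pyGetD p (-1) (0, 0)
      if (match o with | none => true | some m => pvLexLt d m) then some d else o)
      (some v) ≠ none := by
  induction l generalizing v with
  | nil => simp
  | cons a l ih =>
    simp only [List.foldl_cons]
    split
    · exact ih _
    · exact ih v

theorem find_next_eq (paths : List (List (Int × Int))) :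
    find_next paths = find_next_alt paths := by
  cases paths with
  | nil => rfl
  | cons q t =>
  unfold find_next find_next_alt
  simp only [pyGetD_len_sub_one_eq_neg_one, pyGetD_sorted2_eq_fold, List.foldl_map]
  -- name B's destination fold
  set destF := (q :: t).foldl (fun o p =>
    let d := PySem.List.pyGetD p (-1) (0, 0)
    if (match o with | none => true | some m => pvLexLt d m) then some d else o)
    (none : Option (Int × Int)) with hdestF
  have hne : destF ≠ none := by
    rw [hdestF]; simp only [List.foldl_cons]
    exact destfold_ne_none t _
  -- fuse A's filter+map fold into B's guarded fold over all paths
  rw [← foldl_guard_eq_foldl_filter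
    (c := fun path => PySem.List.pyGetD path (-1) (0, 0) == destF.getD (0, 0))
    (f := fun o p => (match o with
      | none => true | some m => pvLexLt (PySem.List.pyGetD p 1 (0, 0)) m))
    (g := fun _ p => some (PySem.List.pyGetD p 1 (0, 0)))]
  congr 2
  funext o p
  -- the two guards agree: 'last p == dest value' vs 'some (last p) == dest option'
  have hd : (PySem.List.pyGetD p (-1) (0, 0) == destF.getD (0, 0))
      = (some (PySem.List.pyGetD p (-1) (0, 0)) == destF) := by
    cases hF : destF with
    | some v => simp
    | none => exact absurd hF hne
  rw [hd]

-- ===== VERDICT (by name: the statement is the Claim_ definition above) =====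
theorem find_next_spec : Claim_equal_find_next := by
  intro paths _ _
  exact find_next_eq paths
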